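-- pv_equiv track=rewrite | github.com/elene227/programming-Hw-Cw | Day 86/homework/homework4.py | prerea
-- ===== SOURCE A (Python) =====
-- def  prerea(first, second):
--
--     evens = []
--     for num in first:
--         if num % 2 == 0:
--             evens.append(num)
--
--     odds = []
--     for num in second:
--         if num % 2 == 1:
--             odds.append(num)
--
--     combine = evens + odds
--
--     suem = 0
--     for i in range(len(combine)):
--         if i % 2 == 1:
--             suem += combine[i]
--     return suem
-- ===== SOURCE B (Python) =====
-- def prerea(first, second):
--     # One fused pass per list: no evens/odds lists, no combined list.
--     # idx counts kept elements, reproducing the combined-list index.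
--     total = 0
--     idx = 0
--     for num in first:
--         if num % 2 == 0:
--             if idx % 2 == 1:
--                 total += num
--             idx += 1
--     for num in second:
--         if num % 2 == 1:
--             if idx % 2 == 1:
--                 total += num
--             idx += 1
--     return total
-- ===== Notes on version B (the rewrite author's own statement) =====
-- stated objective: simpler
-- what changed: B fuses filtering and summation into one accumulator pass with a shared kept-element counter, never materialising the evens, odds or combined lists.
import Mathlib
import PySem

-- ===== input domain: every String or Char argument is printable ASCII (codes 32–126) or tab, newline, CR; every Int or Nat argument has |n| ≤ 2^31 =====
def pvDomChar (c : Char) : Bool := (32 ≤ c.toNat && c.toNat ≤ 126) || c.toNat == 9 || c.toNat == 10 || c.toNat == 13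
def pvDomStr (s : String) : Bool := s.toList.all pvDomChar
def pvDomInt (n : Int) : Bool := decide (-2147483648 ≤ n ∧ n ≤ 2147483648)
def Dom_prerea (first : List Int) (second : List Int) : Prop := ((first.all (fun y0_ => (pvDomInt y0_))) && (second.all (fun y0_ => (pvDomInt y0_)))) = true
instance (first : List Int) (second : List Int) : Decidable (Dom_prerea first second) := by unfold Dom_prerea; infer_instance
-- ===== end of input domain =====

-- B fuses the filter and index-parity summation into one accumulator pass (simpler; no intermediate lists).


-- ===== PORT A =====
def prerea (first : List Int) (second : List Int) : Int :=
  let evens := first.foldl (fun acc num => if PySem.Int.mod num 2 == 0 then acc ++ [num] else acc) []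
  let odds := second.foldl (fun acc num => if PySem.Int.mod num 2 == 1 then acc ++ [num] else acc) []
  let combine := evens ++ odds
  (PySem.List.pyRange 0 (combine.length : Int) 1).foldl
    (fun suem i => if PySem.Int.mod i 2 == 1 then suem + PySem.List.pyGetD combine i 0 else suem) 0

-- ===== PORT B =====
def prerea_alt (first : List Int) (second : List Int) : Int :=
  let s1 := first.foldl
    (fun s num => if PySem.Int.mod num 2 == 0 then
        ((if PySem.Int.mod s.2 2 == 1 then s.1 + num else s.1), s.2 + 1) else s)
    ((0 : Int), (0 : Int))
  let s2 := second.foldl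
    (fun s num => if PySem.Int.mod num 2 == 1 then
        ((if PySem.Int.mod s.2 2 == 1 then s.1 + num else s.1), s.2 + 1) else s)
    s1
  s2.1

-- ===== PRECONDITION & SPEC =====
def Spec_prerea (first : List Int) (second : List Int) (out : Int) : Prop := out = prerea_alt first second
instance (first : List Int) (second : List Int) (out : Int) : Decidable (Spec_prerea first second out) := by unfold Spec_prerea; infer_instance

-- ===== CLAIM (what is proved, stated in full; the proofs are below) =====
def Claim_equal_prerea : Prop := ∀ (first : List Int) (second : List Int), Dom_prerea first second → Spec_prerea first second (prerea first second)

-- ===== LEMMAS AND PROOFS =====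

/-- Sum of elements at positions whose (offset) index is odd. -/
def oddIdxSum : Int → List Int → Int
  | _, [] => 0
  | i, x :: r => (if PySem.Int.mod i 2 == 1 then x else 0) + oddIdxSum (i + 1) r

theorem oddIdxSum_append (xs ys : List Int) (i : Int) :
    oddIdxSum i (xs ++ ys) = oddIdxSum i xs + oddIdxSum (i + (xs.length : Int)) ys := by
  induction xs generalizing i with
  | nil => simp [oddIdxSum]
  | cons x r ih =>
      simp only [List.cons_append, oddIdxSum, ih (i + 1), List.length_cons]
      push_cast
      ring_nf

/-- B's fused fold over a pre-filtered list: carries (total, idx). -/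
theorem foldl_step_eq (xs : List Int) (t i : Int) :
    xs.foldl (fun s num => ((if PySem.Int.mod s.2 2 == 1 then s.1 + num else s.1), s.2 + 1)) (t, i)
      = (t + oddIdxSum i xs, i + (xs.length : Int)) := by
  induction xs generalizing t i with
  | nil => simp [oddIdxSum]
  | cons x r ih =>
      simp only [List.foldl_cons, ih, oddIdxSum, List.length_cons, Prod.mk.injEq]
      refine ⟨by split <;> ring, by push_cast; ring⟩

/-- Folding a guarded step equals folding the step over the filtered list. -/
theorem foldl_guard_filter {σ : Type} (p : Int → Bool) (g : σ → Int → σ) (xs : List Int) (s : σ) :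
    xs.foldl (fun s num => if p num then g s num else s) s
      = (xs.filter p).foldl g s := by
  induction xs generalizing s with
  | nil => rfl
  | cons x r ih =>
      by_cases h : p x <;> simp [h, ih]

/-- A's index loop computes the odd-index sum. -/
theorem foldl_range_oddIdxSum (xs : List Int) :
    ∀ (n a : Nat) (acc : Int), xs.length ≤ a + n → a ≤ xs.length →
      (PySem.List.pyRange (a : Int) (xs.length : Int) 1).foldl
        (fun suem i => if PySem.Int.mod i 2 == 1 then suem + PySem.List.pyGetD xs i 0 else suem) acc
      = acc + oddIdxSum (a : Int) (xs.drop a) := by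
  intro n
  induction n with
  | zero =>
      intro a acc h1 h2
      have ha : a = xs.length := by omega
      subst ha
      rw [PySem.List.pyRange_one_eq_nil (by omega)]
      simp [oddIdxSum]
  | succ n ih =>
      intro a acc h1 h2
      rcases Nat.lt_or_ge a xs.length with hlt | hge
      · rw [PySem.List.pyRange_one_cons (by exact_mod_cast hlt)]
        simp only [List.foldl_cons]
        have hcast : ((a : Int) + 1) = ((a + 1 : Nat) : Int) := by push_cast; ring
        rw [hcast, ih (a + 1) _ (by omega) (by omega)]
        rw [List.drop_eq_getElem_cons hlt]
        simp only [oddIdxSum]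
        have hget : PySem.List.pyGetD xs (a : Int) 0 = xs[a] := by
          rw [PySem.List.pyGetD_natCast]
          exact List.getD_eq_getElem xs 0 hlt
        rw [hget]
        push_cast
        split <;> ring
      · have ha : a = xs.length := by omega
        subst ha
        rw [PySem.List.pyRange_one_eq_nil (by omega)]
        simp [oddIdxSum]

-- ===== VERDICT (by name: the statement is the Claim_ definition above) =====
theorem prerea_spec : Claim_equal_prerea := by
  intro first second _
  unfold Spec_prerea prerea prerea_alt
  simp only []
  rw [PySem.List.foldl_append_if_eq_filter, PySem.List.foldl_append_if_eq_filter]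
  simp only [List.nil_append]
  set evens := first.filter (fun num => PySem.Int.mod num 2 == 0) with hev
  set odds := second.filter (fun num => PySem.Int.mod num 2 == 1) with hod
  have h := foldl_range_oddIdxSum (evens ++ odds) (evens ++ odds).length 0 0 (by omega) (by omega)
  simp only [Nat.cast_zero, List.drop_zero] at h
  rw [h]
  rw [foldl_guard_filter, foldl_guard_filter, ← hev, ← hod]
  rw [foldl_step_eq, foldl_step_eq]
  simp only []
  rw [oddIdxSum_append]
  ring
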